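-- pv_equiv track=rewrite | github.com/manselscheffel/content-os | skills/ai-news-monitor/scripts/format_community_newsletter.py | get_mixed_highlights
-- ===== SOURCE A (Python) =====
-- def get_mixed_highlights(items: list, limit: int = 5) -> list:
--     """Get highlights with source diversity (prioritize HN, then mix others)."""
--     # Group by source
--     by_source = {}
--     for item in items:
--         src = item.get('source', 'unknown')
--         if src not in by_source:
--             by_source[src] = []
--         by_source[src].append(item)
--
--     # Priority order: HN first (higher quality), then GitHub, then Reddit
--     priority = ['hackernews', 'github', 'reddit', 'perplexity', 'twitter', 'newsletter']
--
--     highlights = []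
--     # First pass: take top item from each source in priority order
--     for src in priority:
--         if src in by_source and by_source[src]:
--             highlights.append(by_source[src].pop(0))
--             if len(highlights) >= limit:
--                 break
--
--     # Second pass: fill remaining slots round-robin
--     while len(highlights) < limit:
--         added = False
--         for src in priority:
--             if src in by_source and by_source[src]:
--                 highlights.append(by_source[src].pop(0))
--                 added = True
--                 if len(highlights) >= limit:
--                     break
--         if not added:
--             break
--
--     return highlights
-- ===== SOURCE B (Python) =====
-- def get_mixed_highlights(items: list, limit: int = 5) -> list:
--     """Get highlights with source diversity (prioritize HN, then mix others)."""
--     priority = ['hackernews', 'github', 'reddit', 'perplexity', 'twitter', 'newsletter']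
--     # One filtered column per priority source, in intra-source order; no dict, no mutation.
--     cols = [[it for it in items if it.get('source', 'unknown') == src] for src in priority]
--     result = []
--     i = 0
--     while True:
--         added = False
--         for col in cols:
--             if i < len(col):
--                 result.append(col[i])
--                 added = True
--                 if len(result) >= limit:
--                     return result
--         if not added:
--             return result
--         i += 1
-- ===== Notes on version B (the rewrite author's own statement) =====
-- stated objective: simpler
-- what changed: Replaces A's dict grouping with mutating pop(0) queues plus a separate first pass and a round-robin while loop by one filtered column per priority source and a single positional interleaving loop over a round index.
import Mathlib
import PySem

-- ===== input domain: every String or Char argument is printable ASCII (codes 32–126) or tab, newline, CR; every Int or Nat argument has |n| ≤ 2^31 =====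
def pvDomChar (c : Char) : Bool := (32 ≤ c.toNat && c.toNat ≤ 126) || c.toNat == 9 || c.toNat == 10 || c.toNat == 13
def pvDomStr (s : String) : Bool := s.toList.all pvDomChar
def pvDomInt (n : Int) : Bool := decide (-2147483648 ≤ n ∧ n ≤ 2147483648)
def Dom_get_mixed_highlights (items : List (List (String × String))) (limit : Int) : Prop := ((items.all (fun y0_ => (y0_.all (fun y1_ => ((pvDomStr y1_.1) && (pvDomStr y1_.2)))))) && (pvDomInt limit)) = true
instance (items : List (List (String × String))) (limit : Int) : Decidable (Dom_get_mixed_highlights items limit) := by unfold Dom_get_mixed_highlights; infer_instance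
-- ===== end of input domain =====

-- B replaces A's dict-of-queues with two passes (pop(0) + round-robin while) by per-source
-- filtered columns and one positional interleaving loop: a simpler decomposition, same values.

-- ===== PORT A =====

-- item.get('source', 'unknown')
def pvSrc (it : List (String × String)) : String :=
  (PySem.Dict.mk it).getD "source" "unknown"

def pvPriority : List String :=
  ["hackernews", "github", "reddit", "perplexity", "twitter", "newsletter"]

-- the grouping loop body: if src not in by_source: by_source[src] = []; by_source[src].append(item)
def pvGroupStep (d : PySem.Dict String (List (List (String × String))))
    (it : List (String × String)) : PySem.Dict String (List (List (String × String))) :=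
  let src := pvSrc it
  let d := if d.contains src then d else d.insert src []
  d.modify src [] (· ++ [it])

def pvGroupA (items : List (List (String × String))) :
    PySem.Dict String (List (List (String × String))) :=
  items.foldl pvGroupStep PySem.Dict.empty

-- first pass: for src in priority: if src in by_source and by_source[src]: pop(0), append, break on limit
def pvPassA : List String → PySem.Dict String (List (List (String × String))) →
    List (List (String × String)) → Int →
    PySem.Dict String (List (List (String × String))) × List (List (String × String))
  | [], d, hs, _ => (d, hs)
  | s :: ss, d, hs, limit =>
    match d.get? s with
    | some (x :: xs) =>
      let d' := d.insert s xs
      let hs' := hs ++ [x]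
      if limit ≤ (hs'.length : Int) then (d', hs') else pvPassA ss d' hs' limit
    | _ => pvPassA ss d hs limit

-- one iteration of the round-robin for-loop of the while; returns (dict, highlights, added)
def pvRoundA : List String → PySem.Dict String (List (List (String × String))) →
    List (List (String × String)) → Int →
    PySem.Dict String (List (List (String × String))) × List (List (String × String)) × Bool
  | [], d, hs, _ => (d, hs, false)
  | s :: ss, d, hs, limit =>
    match d.get? s with
    | some (x :: xs) =>
      let d' := d.insert s xs
      let hs' := hs ++ [x]
      if limit ≤ (hs'.length : Int) then (d', hs', true)
      else
        let r := pvRoundA ss d' hs' limit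
        (r.1, r.2.1, true)
    | _ => pvRoundA ss d hs limit

-- the while loop (fuel only makes the recursion structural; it never runs out)
def pvWhileA : Nat → PySem.Dict String (List (List (String × String))) →
    List (List (String × String)) → Int → List (List (String × String))
  | 0, _, hs, _ => hs
  | fuel + 1, d, hs, limit =>
    if (hs.length : Int) < limit then
      let r := pvRoundA pvPriority d hs limit
      if r.2.2 then pvWhileA fuel r.1 r.2.1 limit else r.2.1
    else hs

def get_mixed_highlights (items : List (List (String × String))) (limit : Int) :
    List (List (String × String)) :=
  let d := pvGroupA items
  let p := pvPassA pvPriority d [] limit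
  pvWhileA (items.length + 1) p.1 p.2 limit

-- ===== PORT B =====

-- one priority source's column: [it for it in items if it.get('source','unknown') == src]
def pvCol (items : List (List (String × String))) (s : String) : List (List (String × String)) :=
  items.filter (fun it => pvSrc it == s)

def pvColsB (items : List (List (String × String))) : List (List (List (String × String))) :=
  pvPriority.map (pvCol items)

-- the inner for-loop over cols at round index i; returns (result, added, returned)
def pvRoundB : List (List (List (String × String))) → Nat → List (List (String × String)) → Int →
    List (List (String × String)) × Bool × Bool
  | [], _, hs, _ => (hs, false, false)
  | c :: cs, i, hs, limit =>
    match getElem? c i with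
    | some x =>
      let hs' := hs ++ [x]
      if limit ≤ (hs'.length : Int) then (hs', true, true)
      else
        let r := pvRoundB cs i hs' limit
        (r.1, true, r.2.2)
    | none => pvRoundB cs i hs limit

-- the while True loop over rounds i = 0, 1, … (fuel only makes it structural; it never runs out)
def pvLoopB : Nat → List (List (List (String × String))) → Nat →
    List (List (String × String)) → Int → List (List (String × String))
  | 0, _, _, hs, _ => hs
  | fuel + 1, cols, i, hs, limit =>
    let r := pvRoundB cols i hs limit
    if r.2.2 then r.1
    else if r.2.1 then pvLoopB fuel cols (i + 1) r.1 limit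
    else r.1

def get_mixed_highlights_alt (items : List (List (String × String))) (limit : Int) :
    List (List (String × String)) :=
  pvLoopB (items.length + 2) (pvColsB items) 0 [] limit

-- ===== PRECONDITION & SPEC =====
def Spec_get_mixed_highlights (items : List (List (String × String))) (limit : Int) (out : List (List (String × String))) : Prop := out = get_mixed_highlights_alt items limit
instance (items : List (List (String × String))) (limit : Int) (out : List (List (String × String))) : Decidable (Spec_get_mixed_highlights items limit out) := by unfold Spec_get_mixed_highlights; infer_instance

-- ===== CLAIM (what is proved, stated in full; the proofs are below) =====
def Claim_equal_get_mixed_highlights : Prop := ∀ (items : List (List (String × String))) (limit : Int), Dom_get_mixed_highlights items limit → Spec_get_mixed_highlights items limit (get_mixed_highlights items limit)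

-- ===== LEMMAS AND PROOFS =====

-- 'none if no item of this source, else the source's remaining queue (drop i)'
def pvPack (l : List (List (String × String))) (i : Nat) : Option (List (List (String × String))) :=
  if l = [] then none else some (l.drop i)

theorem pvGroup_loop (l : List (List (String × String)))
    (d : PySem.Dict String (List (List (String × String))))
    (g : String → List (List (String × String)))
    (hd : ∀ s, d.get? s = pvPack (g s) 0) :
    ∀ s, (l.foldl pvGroupStep d).get? s = pvPack (g s ++ pvCol l s) 0 := by
  induction l generalizing d g with
  | nil => intro s; simp [pvCol, hd s]
  | cons it l ih =>
    intro s
    have step : ∀ t, (pvGroupStep d it).get? t =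
        pvPack (g t ++ if pvSrc it == t then [it] else []) 0 := by
      intro t
      have hstep : pvGroupStep d it =
          (if d.contains (pvSrc it) then d else d.insert (pvSrc it) []).insert (pvSrc it)
            ((if d.contains (pvSrc it) then d
              else d.insert (pvSrc it) []).getD (pvSrc it) [] ++ [it]) := rfl
      rw [hstep]
      by_cases ht : t = pvSrc it
      · rw [ht]
        by_cases hg : g (pvSrc it) = []
        · have hnone : d.get? (pvSrc it) = none := by rw [hd]; simp [pvPack, hg]
          have hcont : d.contains (pvSrc it) = false := by
            rw [PySem.Dict.contains_eq_isSome_get?, hnone]; rfl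
          simp only [hcont, Bool.false_eq_true, ite_false]
          rw [PySem.Dict.getD_insert_self, PySem.Dict.get?_insert_self]
          simp [pvPack, hg]
        · have hsome : d.get? (pvSrc it) = some (g (pvSrc it)) := by
            rw [hd]; simp [pvPack, hg]
          have hcont : d.contains (pvSrc it) = true := by
            rw [PySem.Dict.contains_eq_isSome_get?, hsome]; rfl
          simp only [hcont, ite_true]
          rw [PySem.Dict.getD_of_get?_eq_some _ _ hsome, PySem.Dict.get?_insert_self]
          simp [pvPack, hg]
      · have hne : (pvSrc it == t) = false := by
          simp only [beq_eq_false_iff_ne, ne_eq]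
          exact fun h => ht h.symm
        rw [PySem.Dict.get?_insert_of_ne _ _ ht]
        by_cases hc : d.contains (pvSrc it)
        · simp only [hc, ite_true]
          simpa [hne] using hd t
        · simp only [hc, Bool.false_eq_true, ite_false]
          rw [PySem.Dict.get?_insert_of_ne _ _ ht]
          simpa [hne] using hd t
    have ih' := ih (pvGroupStep d it)
      (fun t => g t ++ if pvSrc it == t then [it] else []) step s
    rw [List.foldl_cons, ih']
    congr 1
    simp only [pvCol, List.filter_cons]
    by_cases h : pvSrc it == s <;> simp [h, List.append_assoc]

theorem pvGroup_get? (items : List (List (String × String))) (s : String) :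
    (pvGroupA items).get? s = pvPack (pvCol items s) 0 := by
  have := pvGroup_loop items PySem.Dict.empty (fun _ => [])
    (fun t => by simp [pvPack, PySem.Dict.get?_empty]) s
  simpa [pvGroupA] using this

theorem pvRoundB_not_added (cs : List (List (List (String × String)))) (i : Nat)
    (hs : List (List (String × String))) (limit : Int)
    (h : (pvRoundB cs i hs limit).2.1 = false) :
    (pvRoundB cs i hs limit).1 = hs ∧ (pvRoundB cs i hs limit).2.2 = false := by
  induction cs generalizing hs with
  | nil => simp [pvRoundB]
  | cons c cs ih =>
    simp only [pvRoundB] at h ⊢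
    cases hidx : getElem? c i with
    | some x =>
      simp only [hidx] at h ⊢
      split at h <;> simp_all
    | none => simp only [hidx] at h ⊢; exact ih hs h

theorem pvRoundB_broke (cs : List (List (List (String × String)))) (i : Nat)
    (hs : List (List (String × String))) (limit : Int)
    (h : (pvRoundB cs i hs limit).2.2 = true) :
    limit ≤ ((pvRoundB cs i hs limit).1.length : Int) := by
  induction cs generalizing hs with
  | nil => simp [pvRoundB] at h
  | cons c cs ih =>
    simp only [pvRoundB] at h ⊢
    cases hidx : getElem? c i with
    | some x =>
      simp only [hidx] at h ⊢
      split
      · rename_i hlim; simpa using hlim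
      · rename_i hlim; rw [if_neg hlim] at h; exact ih _ h
    | none => simp only [hidx] at h ⊢; exact ih hs h

theorem pvRoundB_cont (cs : List (List (List (String × String)))) (i : Nat)
    (hs : List (List (String × String))) (limit : Int)
    (hret : (pvRoundB cs i hs limit).2.2 = false)
    (hadd : (pvRoundB cs i hs limit).2.1 = true) :
    ((pvRoundB cs i hs limit).1.length : Int) < limit := by
  induction cs generalizing hs with
  | nil => simp [pvRoundB] at hadd
  | cons c cs ih =>
    simp only [pvRoundB] at hret hadd ⊢
    cases hidx : getElem? c i with
    | some x =>
      simp only [hidx] at hret hadd ⊢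
      split
      · rename_i hlim
        rw [if_pos hlim] at hret
        simp at hret
      · rename_i hlim
        rw [if_neg hlim] at hret
        cases hadd2 : (pvRoundB cs i (hs ++ [x]) limit).2.1 with
        | false =>
          have hna := pvRoundB_not_added cs i (hs ++ [x]) limit hadd2
          rw [hna.1]
          simp only [not_le] at hlim
          simpa using hlim
        | true => exact ih _ hret hadd2
    | none => simp only [hidx] at hret hadd ⊢; exact ih hs hret hadd

theorem pvRoundB_all_none (cs : List (List (List (String × String)))) (i : Nat)
    (hs : List (List (String × String))) (limit : Int)
    (h : ∀ c ∈ cs, getElem? c i = none) :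
    pvRoundB cs i hs limit = (hs, false, false) := by
  induction cs generalizing hs with
  | nil => simp [pvRoundB]
  | cons c cs ih =>
    have hc : getElem? c i = none := h c (by simp)
    simp only [pvRoundB, hc]
    exact ih hs (fun c' hc' => h c' (by simp [hc']))

theorem pvRoundB_none_of_not_added (cs : List (List (List (String × String)))) (i : Nat)
    (hs : List (List (String × String))) (limit : Int)
    (h : (pvRoundB cs i hs limit).2.1 = false) :
    ∀ c ∈ cs, getElem? c i = none := by
  induction cs generalizing hs with
  | nil => simp
  | cons c cs ih =>
    simp only [pvRoundB] at h
    cases hidx : getElem? c i with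
    | some x =>
      simp only [hidx] at h
      split at h <;> simp_all
    | none =>
      simp only [hidx] at h
      intro c' hc'
      rcases List.mem_cons.mp hc' with rfl | hmem
      · exact hidx
      · exact ih hs h c' hmem

theorem pvRound_core (F : String → List (List (String × String))) :
    ∀ (ps : List String) (d : PySem.Dict String (List (List (String × String))))
      (i : Nat) (hs : List (List (String × String))) (limit : Int),
      ps.Nodup → (∀ s ∈ ps, d.get? s = pvPack (F s) i) →
      ∃ d', pvRoundA ps d hs limit =
          (d', (pvRoundB (ps.map F) i hs limit).1, (pvRoundB (ps.map F) i hs limit).2.1)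
        ∧ (∀ t, t ∉ ps → d'.get? t = d.get? t)
        ∧ ((pvRoundB (ps.map F) i hs limit).2.2 = false →
            ∀ s ∈ ps, d'.get? s = pvPack (F s) (i + 1)) := by
  intro ps
  induction ps with
  | nil =>
    intro d i hs limit _ _
    exact ⟨d, by simp [pvRoundA, pvRoundB], fun t _ => rfl, by simp⟩
  | cons s ss ih =>
    intro d i hs limit hnd hinv
    have hnds : s ∉ ss := (List.nodup_cons.mp hnd).1
    have hndt : ss.Nodup := (List.nodup_cons.mp hnd).2
    have hds : d.get? s = pvPack (F s) i := hinv s (by simp)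
    by_cases hFe : F s = []
    · -- source never occurs: A skips (key absent), B skips (empty column)
      have hnone : d.get? s = none := by rw [hds]; simp [pvPack, hFe]
      have hidx : getElem? (F s) i = none := by simp [hFe]
      obtain ⟨d', hA, hout, hnext⟩ := ih d i hs limit hndt (fun t ht => hinv t (by simp [ht]))
      refine ⟨d', ?_, ?_, ?_⟩
      · simp only [pvRoundA, pvRoundB, hnone, hidx, List.map_cons]; exact hA
      · intro t ht
        exact hout t (fun h => ht (by simp [h]))
      · intro hret s' hs'
        simp only [List.map_cons, pvRoundB, hidx] at hret
        rcases List.mem_cons.mp hs' with rfl | hmem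
        · rw [hout s' hnds, hnone]; simp [pvPack, hFe]
        · exact hnext hret s' hmem
    · have hsome : d.get? s = some ((F s).drop i) := by rw [hds]; simp [pvPack, hFe]
      cases hdrop : (F s).drop i with
      | nil =>
        -- exhausted queue: A sees some [], skips; B sees index out of range, skips
        have hidx : getElem? (F s) i = none := by
          rw [List.getElem?_eq_none_iff]
          exact List.drop_eq_nil_iff.mp hdrop
        have hlen : (F s).length ≤ i := List.drop_eq_nil_iff.mp hdrop
        obtain ⟨d', hA, hout, hnext⟩ := ih d i hs limit hndt (fun t ht => hinv t (by simp [ht]))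
        refine ⟨d', ?_, ?_, ?_⟩
        · simp only [pvRoundA, pvRoundB, hsome, hdrop, hidx, List.map_cons]; exact hA
        · intro t ht
          exact hout t (fun h => ht (by simp [h]))
        · intro hret s' hs'
          simp only [List.map_cons, pvRoundB, hidx] at hret
          rcases List.mem_cons.mp hs' with rfl | hmem
          · rw [hout s' hnds, hsome, hdrop]
            have : (F s').drop (i + 1) = [] := List.drop_eq_nil_iff.mpr (Nat.le_succ_of_le hlen)
            simp [pvPack, hFe, this]
          · exact hnext hret s' hmem
      | cons x xs =>
        -- A pops x; B reads (F s)[i] = x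
        have hidx : getElem? (F s) i = some x := by
          have h0 : (List.drop i (F s))[0]? = (F s)[i + 0]? := List.getElem?_drop
          rw [hdrop] at h0
          simpa using h0.symm
        have hdropsucc : (F s).drop (i + 1) = xs := by
          rw [← List.tail_drop, hdrop]; rfl
        by_cases hlim : limit ≤ ((hs ++ [x]).length : Int)
        · -- break on limit, both stop now
          refine ⟨d.insert s xs, ?_, ?_, ?_⟩
          · simp only [pvRoundA, pvRoundB, hsome, hdrop, hidx, List.map_cons, if_pos hlim]
          · intro t ht
            exact PySem.Dict.get?_insert_of_ne _ _ (fun h => ht (by simp [h]))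
          · intro hret
            rw [List.map_cons] at hret
            simp only [pvRoundB, hidx] at hret
            split at hret
            · simp at hret
            · rename_i hcond
              exact absurd (by simpa using hlim) hcond
        · -- continue with the rest of the sources
          have hinv' : ∀ t ∈ ss, (d.insert s xs).get? t = pvPack (F t) i := by
            intro t ht
            rw [PySem.Dict.get?_insert_of_ne _ _ (fun h => hnds (by rw [← h]; exact ht))]
            exact hinv t (by simp [ht])
          obtain ⟨d', hA, hout, hnext⟩ := ih (d.insert s xs) i (hs ++ [x]) limit hndt hinv'
          refine ⟨d', ?_, ?_, ?_⟩
          · simp only [pvRoundA, pvRoundB, hsome, hdrop, hidx, List.map_cons, if_neg hlim]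
            rw [hA]
          · intro t ht
            have ht' : t ∉ ss := fun h => ht (by simp [h])
            rw [hout t ht', PySem.Dict.get?_insert_of_ne _ _ (fun h => ht (by simp [h]))]
          · intro hret s' hs'
            simp only [List.map_cons, pvRoundB, hidx, if_neg hlim] at hret
            rcases List.mem_cons.mp hs' with rfl | hmem
            · rw [hout s' hnds, PySem.Dict.get?_insert_self]
              simp [pvPack, hFe, hdropsucc]
            · exact hnext hret s' hmem

theorem pvWhileA_stop (fuel : Nat) (d : PySem.Dict String (List (List (String × String))))
    (hs : List (List (String × String))) (limit : Int)
    (h : limit ≤ (hs.length : Int)) : pvWhileA fuel d hs limit = hs := by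
  cases fuel with
  | zero => rfl
  | succ n => simp only [pvWhileA]; rw [if_neg (by omega)]

theorem pvRoundB_broke_added (cs : List (List (List (String × String)))) (i : Nat)
    (hs : List (List (String × String))) (limit : Int)
    (h : (pvRoundB cs i hs limit).2.2 = true) : (pvRoundB cs i hs limit).2.1 = true := by
  cases hadd : (pvRoundB cs i hs limit).2.1 with
  | false => have := (pvRoundB_not_added cs i hs limit hadd).2; simp_all
  | true => rfl

theorem pvWhile_eq (F : String → List (List (String × String))) :
    ∀ (fuel : Nat) (d : PySem.Dict String (List (List (String × String))))
      (i : Nat) (hs : List (List (String × String))) (limit : Int),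
      (∀ s ∈ pvPriority, d.get? s = pvPack (F s) i) → (hs.length : Int) < limit →
      pvWhileA fuel d hs limit = pvLoopB fuel (pvPriority.map F) i hs limit := by
  intro fuel
  induction fuel with
  | zero => intro d i hs limit _ _; rfl
  | succ n ih =>
    intro d i hs limit hinv hlt
    have hnd : pvPriority.Nodup := by decide
    obtain ⟨d', hA, _, hnext⟩ := pvRound_core F pvPriority d i hs limit hnd hinv
    simp only [pvWhileA, pvLoopB, if_pos hlt, hA]
    cases hret : (pvRoundB (pvPriority.map F) i hs limit).2.2 with
    | true =>
      have hadd := pvRoundB_broke_added _ _ _ _ hret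
      have hge := pvRoundB_broke _ _ _ _ hret
      simp only [hadd]
      exact pvWhileA_stop n d' _ limit hge
    | false =>
      cases hadd : (pvRoundB (pvPriority.map F) i hs limit).2.1 with
      | false =>
        simp
      | true =>
        simp only [Bool.false_eq_true, ite_false, ite_true]
        exact ih d' (i + 1) _ limit (hnext hret) (pvRoundB_cont _ _ _ _ hret hadd)

theorem pvPassA_eq_roundA : ∀ (ps : List String)
    (d : PySem.Dict String (List (List (String × String))))
    (hs : List (List (String × String))) (limit : Int),
    pvPassA ps d hs limit = ((pvRoundA ps d hs limit).1, (pvRoundA ps d hs limit).2.1) := by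
  intro ps
  induction ps with
  | nil => intro d hs limit; rfl
  | cons s ss ih =>
    intro d hs limit
    simp only [pvPassA, pvRoundA]
    cases hds : d.get? s with
    | none => exact ih d hs limit
    | some l =>
      cases l with
      | nil => exact ih d hs limit
      | cons x xs =>
        simp only []
        by_cases hlim : limit ≤ ((hs ++ [x]).length : Int)
        · rw [if_pos hlim, if_pos hlim]
        · rw [if_neg hlim, if_neg hlim]
          exact ih _ _ limit

-- ===== VERDICT (by name: the statement is the Claim_ definition above) =====
theorem get_mixed_highlights_spec : Claim_equal_get_mixed_highlights := by
  intro items limit _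
  show get_mixed_highlights items limit = get_mixed_highlights_alt items limit
  unfold get_mixed_highlights get_mixed_highlights_alt
  have hnd : pvPriority.Nodup := by decide
  have hinv0 : ∀ s ∈ pvPriority, (pvGroupA items).get? s = pvPack (pvCol items s) 0 :=
    fun s _ => pvGroup_get? items s
  obtain ⟨d1, hA0, _, hnext0⟩ := pvRound_core (pvCol items) pvPriority (pvGroupA items) 0 [] limit hnd hinv0
  have hpass := pvPassA_eq_roundA pvPriority (pvGroupA items) [] limit
  rw [hA0] at hpass
  have hcols : pvColsB items = pvPriority.map (pvCol items) := rfl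
  show pvWhileA (items.length + 1) (pvPassA pvPriority (pvGroupA items) [] limit).1
      (pvPassA pvPriority (pvGroupA items) [] limit).2 limit =
    pvLoopB (items.length + 2) (pvColsB items) 0 [] limit
  rw [hpass, hcols]
  set r0 := pvRoundB (pvPriority.map (pvCol items)) 0 [] limit with hr0
  show pvWhileA (items.length + 1) d1 r0.1 limit =
    pvLoopB (items.length + 1 + 1) (pvPriority.map (pvCol items)) 0 [] limit
  simp only [pvLoopB, ← hr0]
  cases hret : r0.2.2 with
  | true =>
    simp only [ite_true]
    exact pvWhileA_stop _ _ _ _ (pvRoundB_broke _ _ _ _ hret)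
  | false =>
    cases hadd : r0.2.1 with
    | true =>
      simp only [Bool.false_eq_true]
      exact pvWhile_eq (pvCol items) (items.length + 1) d1 1 r0.1 limit (hnext0 hret)
        (pvRoundB_cont _ _ _ _ hret hadd)
    | false =>
      simp only [Bool.false_eq_true]
      -- r0 added nothing: every column is empty, one more A round also adds nothing
      have hhs : r0.1 = [] := (pvRoundB_not_added _ _ _ _ hadd).1
      have hnone0 : ∀ c ∈ pvPriority.map (pvCol items), getElem? c 0 = none :=
        pvRoundB_none_of_not_added _ _ _ _ hadd
      have hnone1 : ∀ c ∈ pvPriority.map (pvCol items), getElem? c 1 = none := by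
        intro c hc
        have h0 := hnone0 c hc
        rw [List.getElem?_eq_none_iff] at h0 ⊢
        omega
      obtain ⟨d2, hA1, _, _⟩ := pvRound_core (pvCol items) pvPriority d1 1 r0.1 limit hnd (hnext0 hret)
      rw [pvRoundB_all_none _ _ _ _ hnone1] at hA1
      simp only [pvWhileA, hhs]
      split
      · rw [hhs] at hA1
        simp [hA1]
      · rfl
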